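-- pv_equiv track=rewrite | github.com/Vigneshviku09/get-papers-list | get_papers/src/filters.py | is_company_affiliation
-- ===== SOURCE A (Python) =====
-- def is_company_affiliation(affiliation: str) -> bool:
--     """
--     Returns True if the affiliation appears to belong to a pharma or biotech company.
--     """
--     # Common pharma/biotech indicators and suffixes
--     pharma_keywords = [
--         "pharma", "biotech", "therapeutics", "biosciences",
--         "genomics", "inc", "ltd", "gmbh"
--     ]
--
--     # Known company names (can be expanded)
--     known_companies = [
--         "genentech", "moderna", "pfizer", "novartis", "roche",
--         "amgen", "illumina", "astrazeneca", "biogen", "regeneron"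
--     ]
--
--     affiliation_lower = affiliation.lower()
--
--     # Match either known suffixes or known company names
--     return any(word in affiliation_lower for word in pharma_keywords + known_companies)
-- ===== SOURCE B (Python) =====
-- # Single left-to-right streaming scan (simultaneous prefix matching): maintain the
-- # set of keyword suffixes still matching ending at the current character, instead
-- # of one full substring search per keyword.
-- _KEYWORDS = ("pharma|biotech|therapeutics|biosciences|genomics|inc|ltd|gmbh|"
--              "genentech|moderna|pfizer|novartis|roche|amgen|illumina|"
--              "astrazeneca|biogen|regeneron").split("|")
--
--
-- def is_company_affiliation(affiliation: str) -> bool: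
--     active = []  # remaining suffixes of keywords whose matched part ends here
--     for c in affiliation.lower():
--         active = [w[1:] for w in active + _KEYWORDS if w and w[0] == c]
--         if any(w == "" for w in active):
--             return True
--     return False
-- ===== Notes on version B (the rewrite author's own statement) =====
-- stated objective: alternative
-- what changed: Replaced A's one-substring-search-per-keyword membership loop with a single streaming scan of the lowered string that maintains the set of keyword suffixes still matching at the current position (simultaneous multi-pattern matching), returning as soon as a keyword is fully consumed.
import Mathlib
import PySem

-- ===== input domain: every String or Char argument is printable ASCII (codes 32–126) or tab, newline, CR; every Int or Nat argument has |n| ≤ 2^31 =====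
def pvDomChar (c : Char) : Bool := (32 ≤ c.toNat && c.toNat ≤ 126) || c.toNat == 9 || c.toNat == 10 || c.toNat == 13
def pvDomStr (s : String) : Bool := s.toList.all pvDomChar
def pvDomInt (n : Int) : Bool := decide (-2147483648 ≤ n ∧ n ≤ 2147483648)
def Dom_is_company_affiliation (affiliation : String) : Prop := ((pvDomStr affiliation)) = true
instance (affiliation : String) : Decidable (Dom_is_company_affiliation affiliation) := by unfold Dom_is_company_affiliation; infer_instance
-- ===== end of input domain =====

-- B replaces A's keyword-by-keyword substring searches by ONE streaming scan of the lowered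
-- string that advances all partially-matched keywords simultaneously (objective: alternative).

-- ===== PORT A =====
def pharma_keywords : List (List Char) :=
  ["pharma".toList, "biotech".toList, "therapeutics".toList, "biosciences".toList,
   "genomics".toList, "inc".toList, "ltd".toList, "gmbh".toList]

def known_companies : List (List Char) :=
  ["genentech".toList, "moderna".toList, "pfizer".toList, "novartis".toList, "roche".toList,
   "amgen".toList, "illumina".toList, "astrazeneca".toList, "biogen".toList, "regeneron".toList]

def is_company_affiliation (affiliation : String) : Bool :=
  let affiliation_lower := PySem.Chars.lower affiliation.toList
  (pharma_keywords ++ known_companies).any (fun word => PySem.Chars.isIn word affiliation_lower)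

-- ===== PORT B =====
-- _KEYWORDS = "pharma|biotech|...".split("|")
def pvKws : List (List Char) :=
  PySem.Chars.splitOn ("pharma|biotech|therapeutics|biosciences|genomics|inc|ltd|gmbh|genentech|moderna|pfizer|novartis|roche|amgen|illumina|astrazeneca|biogen|regeneron".toList) ("|".toList)

-- active = [w[1:] for w in active + _KEYWORDS if w and w[0] == c]
def pvStep (c : Char) (active : List (List Char)) : List (List Char) :=
  (active ++ pvKws).filterMap (fun w =>
    match w with
    | [] => none
    | d :: w' => if d == c then some w' else none)

-- the for-loop with its early `return True`
def pvScan : List Char → List (List Char) → Bool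
  | [], _ => false
  | c :: rest, active =>
    let active' := pvStep c active
    if active'.any (· == ([] : List Char)) then true else pvScan rest active'

def is_company_affiliation_alt (affiliation : String) : Bool :=
  pvScan (PySem.Chars.lower affiliation.toList) []

-- ===== PRECONDITION & SPEC =====
def Spec_is_company_affiliation (affiliation : String) (out : Bool) : Prop := out = is_company_affiliation_alt affiliation
instance (affiliation : String) (out : Bool) : Decidable (Spec_is_company_affiliation affiliation out) := by unfold Spec_is_company_affiliation; infer_instance

-- ===== CLAIM (what is proved, stated in full; the proofs are below) =====
def Claim_equal_is_company_affiliation : Prop := ∀ (affiliation : String), Dom_is_company_affiliation affiliation → Spec_is_company_affiliation affiliation (is_company_affiliation affiliation)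

-- ===== LEMMAS AND PROOFS =====

set_option maxRecDepth 10000 in
theorem pvKws_eq : pvKws = pharma_keywords ++ known_companies := by decide

set_option maxRecDepth 10000 in
theorem pvKws_ne_nil : ∀ k ∈ pvKws, k ≠ [] := by decide

theorem mem_pvStep {c : Char} {active : List (List Char)} {w' : List Char} :
    w' ∈ pvStep c active ↔ c :: w' ∈ active ++ pvKws := by
  simp only [pvStep, List.mem_filterMap]
  constructor
  · rintro ⟨w, hw, hmap⟩
    match w with
    | [] => simp at hmap
    | d :: t =>
      by_cases hdc : d = c
      · simp [hdc] at hmap; subst hmap; subst hdc; exact hw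
      · simp [hdc] at hmap
  · intro h
    exact ⟨c :: w', h, by simp⟩

-- Loop invariant: the scan succeeds iff some live partial match completes in s,
-- or some keyword occurs as a substring of s.
theorem pvScan_iff (s : List Char) (active : List (List Char))
    (hne : ∀ w ∈ active, w ≠ []) :
    pvScan s active = true ↔
      (∃ w ∈ active, w <+: s) ∨ (∃ k ∈ pvKws, ∃ i, k <+: s.drop i) := by
  induction s generalizing active with
  | nil =>
    simp only [pvScan]
    constructor
    · intro h; cases h
    · rintro (⟨w, hw, hp⟩ | ⟨k, hk, i, hp⟩)
      · exact absurd (List.prefix_nil.mp hp) (hne w hw)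
      · rw [List.drop_nil] at hp
        exact absurd (List.prefix_nil.mp hp) (pvKws_ne_nil k hk)
  | cons c rest ih =>
    simp only [pvScan]
    have hRHS : ((∃ w ∈ active, w <+: c :: rest) ∨ (∃ k ∈ pvKws, ∃ i, k <+: (c :: rest).drop i)) ↔
        ((∃ w' ∈ pvStep c active, w' <+: rest) ∨ (∃ k ∈ pvKws, ∃ i, k <+: rest.drop i)) := by
      constructor
      · rintro (⟨w, hw, hp⟩ | ⟨k, hk, i, hp⟩)
        · obtain ⟨d, w', rfl⟩ := List.exists_cons_of_ne_nil (hne w hw)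
          rcases List.cons_prefix_cons.mp hp with ⟨rfl, hp'⟩
          exact Or.inl ⟨w', mem_pvStep.mpr (List.mem_append_left _ hw), hp'⟩
        · match i with
          | 0 =>
            obtain ⟨d, k', rfl⟩ := List.exists_cons_of_ne_nil (pvKws_ne_nil k hk)
            rcases List.cons_prefix_cons.mp hp with ⟨rfl, hp'⟩
            exact Or.inl ⟨k', mem_pvStep.mpr (List.mem_append_right _ hk), hp'⟩
          | i + 1 => exact Or.inr ⟨k, hk, i, hp⟩
      · rintro (⟨w', hw', hp⟩ | ⟨k, hk, i, hp⟩)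
        · rcases List.mem_append.mp (mem_pvStep.mp hw') with h | h
          · exact Or.inl ⟨c :: w', h, List.cons_prefix_cons.mpr ⟨rfl, hp⟩⟩
          · exact Or.inr ⟨c :: w', h, 0, List.cons_prefix_cons.mpr ⟨rfl, hp⟩⟩
        · exact Or.inr ⟨k, hk, i + 1, hp⟩
    rw [hRHS]
    by_cases hnil : (pvStep c active).any (· == ([] : List Char)) = true
    · simp only [hnil, if_true, true_iff]
      rcases List.any_eq_true.mp hnil with ⟨w', hw', hw'e⟩
      exact Or.inl ⟨w', hw', by simp at hw'e; simp [hw'e]⟩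
    · simp only [hnil, if_false, Bool.false_eq_true]
      rw [Bool.not_eq_true, List.any_eq_false] at hnil
      exact ih _ (fun w hw => by
        intro h; subst h; simpa using hnil _ hw)

-- ===== VERDICT (by name: the statement is the Claim_ definition above) =====
theorem is_company_affiliation_spec : Claim_equal_is_company_affiliation := by
  intro affiliation _
  unfold Spec_is_company_affiliation is_company_affiliation is_company_affiliation_alt
  rw [Bool.eq_iff_iff]
  rw [pvScan_iff _ _ (by simp)]
  simp only [List.not_mem_nil, false_and, exists_false, false_or, ← pvKws_eq,
    List.any_eq_true]
  constructor
  · rintro ⟨k, hk, hin⟩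
    rcases (PySem.Chars.exists_prefix_drop_iff_isIn k _).mpr hin with ⟨i, hi⟩
    exact ⟨k, hk, i, hi⟩
  · rintro ⟨k, hk, i, hi⟩
    exact ⟨k, hk, (PySem.Chars.exists_prefix_drop_iff_isIn k _).mp ⟨i, hi⟩⟩
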